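-- pv_equiv track=rewrite | github.com/brendonlucas/Codigo-de-Hamming-e-CRC | hamming.py | montar_palavra_com_paridades
-- ===== SOURCE A (Python) =====
-- def montar_palavra_com_paridades(palavra, paridades):
--     cont = 0
--     nova_palavra = ''
--     for i in range(len(palavra)):
--         valor_palavra = palavra[i]
--         if valor_palavra == '-':
--             nova_palavra += paridades[cont]
--             cont += 1
--         else:
--             nova_palavra += valor_palavra
--
--     return nova_palavra
-- ===== SOURCE B (Python) =====
-- def montar_palavra_com_paridades(palavra, paridades):
--     parts = palavra.split('-')
--     pieces = [parts[0]]
--     for i in range(1, len(parts)):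
--         pieces.append(paridades[i - 1])
--         pieces.append(parts[i])
--     return ''.join(pieces)
-- ===== Notes on version B (the rewrite author's own statement) =====
-- stated objective: faster
-- what changed: B splits the word on '-' once and reassembles segment-wise (parity between consecutive segments, joined with ''.join) instead of A's per-character loop with a running parity counter and repeated string concatenation.
import Mathlib
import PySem

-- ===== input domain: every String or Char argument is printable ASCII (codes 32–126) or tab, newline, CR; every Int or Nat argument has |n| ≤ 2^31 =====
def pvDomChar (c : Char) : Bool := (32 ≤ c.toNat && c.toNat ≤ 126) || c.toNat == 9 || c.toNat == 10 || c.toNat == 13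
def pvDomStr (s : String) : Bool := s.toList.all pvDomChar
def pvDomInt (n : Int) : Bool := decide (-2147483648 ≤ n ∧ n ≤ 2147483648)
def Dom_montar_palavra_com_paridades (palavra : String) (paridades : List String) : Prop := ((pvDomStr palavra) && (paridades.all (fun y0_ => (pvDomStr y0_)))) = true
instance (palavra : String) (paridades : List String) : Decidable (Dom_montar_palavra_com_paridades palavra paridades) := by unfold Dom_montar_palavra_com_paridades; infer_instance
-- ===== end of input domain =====

-- B replaces A's per-character loop with a parity counter by one split('-') followed by a
-- segment-wise split/join reassembly (measured constant-factor faster); same return value on Pre_.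

-- ===== PORT A =====
-- A: for i in range(len(palavra)): on '-', append paridades[cont] and bump cont, else append the char.
def montar_palavra_com_paridades (palavra : String) (paridades : List String) : String :=
  let cs := palavra.toList
  let st := (PySem.List.pyRange 0 (PySem.List.len cs) 1).foldl
    (fun (st : Nat × List Char) i =>
      let c := PySem.List.pyGetD cs i ' '
      if c = '-' then
        (st.1 + 1, st.2 ++ (PySem.List.pyGetD paridades (st.1 : Int) "").toList)
      else
        (st.1, st.2 ++ [c]))
    (0, ([] : List Char))
  String.ofList st.2

-- ===== PORT B =====
-- B: parts = palavra.split('-'); pieces = [parts[0]] then paridades[i-1], parts[i] for i in 1..; ''.join.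
def montar_palavra_com_paridades_alt (palavra : String) (paridades : List String) : String :=
  let parts := PySem.Chars.splitOn palavra.toList ['-']
  let pieces := (PySem.List.pyRange 1 (PySem.List.len parts) 1).foldl
    (fun acc i => acc ++ [(PySem.List.pyGetD paridades (i - 1) "").toList,
                          PySem.List.pyGetD parts i ([] : List Char)])
    [PySem.List.pyGetD parts 0 ([] : List Char)]
  String.ofList (PySem.Chars.join [] pieces)

-- ===== PRECONDITION & SPEC =====
-- Pre_ excludes exactly the inputs where the Python A raises IndexError (more '-' placeholders
-- than parities); the Python B raises IndexError on exactly the same inputs.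
def Pre_montar_palavra_com_paridades (palavra : String) (paridades : List String) : Prop :=
  palavra.toList.count '-' ≤ paridades.length
instance (palavra : String) (paridades : List String) : Decidable (Pre_montar_palavra_com_paridades palavra paridades) := by unfold Pre_montar_palavra_com_paridades; infer_instance
def pvWitness_montar_palavra_com_paridades : String × List String := ("0-11-0", ["1", "0"])
def Spec_montar_palavra_com_paridades (palavra : String) (paridades : List String) (out : String) : Prop := out = montar_palavra_com_paridades_alt palavra paridades
instance (palavra : String) (paridades : List String) (out : String) : Decidable (Spec_montar_palavra_com_paridades palavra paridades out) := by unfold Spec_montar_palavra_com_paridades; infer_instance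

-- ===== CLAIM (what is proved, stated in full; the proofs are below) =====
def Claim_equal_montar_palavra_com_paridades : Prop := ∀ (palavra : String) (paridades : List String), Dom_montar_palavra_com_paridades palavra paridades → Pre_montar_palavra_com_paridades palavra paridades → Spec_montar_palavra_com_paridades palavra paridades (montar_palavra_com_paridades palavra paridades)

-- ===== LEMMAS AND PROOFS =====

-- reference splitter: split cs on '-' with the current (reversed) segment cur
def pvSplit : List Char → List Char → List (List Char)
  | [], cur => [cur.reverse]
  | c :: rest, cur => if c = '-' then cur.reverse :: pvSplit rest [] else pvSplit rest (c :: cur)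

-- reference result: what the whole function computes, char by char, parity index k
def pvBuild (qs : List String) : List Char → Nat → List Char
  | [], _ => []
  | c :: rest, k =>
      if c = '-' then (qs.getD k "").toList ++ pvBuild qs rest (k + 1)
      else c :: pvBuild qs rest k

-- reassembly of split segments with parities in between, parity index k
def pvGlue (qs : List String) : List (List Char) → Nat → List Char
  | [], _ => []
  | [p], _ => p
  | p :: q :: ps, k => p ++ (qs.getD k "").toList ++ pvGlue qs (q :: ps) (k + 1)

theorem pvSplit_ne_nil (cs cur : List Char) : pvSplit cs cur ≠ [] := by
  induction cs generalizing cur with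
  | nil => simp [pvSplit]
  | cons c rest ih => by_cases h : c = '-' <;> simp [pvSplit, h, ih]

theorem pv_go_eq (fuel : Nat) (l cur : List Char) (acc : List (List Char))
    (h : l.length ≤ fuel) :
    PySem.Chars.splitOn.go ['-'] fuel l cur acc = acc.reverse ++ pvSplit l cur := by
  induction fuel generalizing l cur acc with
  | zero =>
      have : l = [] := by cases l <;> simp_all
      subst this
      simp [PySem.Chars.splitOn.go, pvSplit]
  | succ fuel ih =>
      cases l with
      | nil => simp [PySem.Chars.splitOn.go, pvSplit]
      | cons c rest =>
          simp only [PySem.Chars.splitOn.go, List.isPrefixOf]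
          by_cases hc : c = '-'
          · subst hc
            rw [if_pos (by simp)]
            rw [ih _ _ _ (by simpa using Nat.le_of_succ_le_succ (by simpa using h))]
            simp [pvSplit]
          · rw [if_neg (by simp [Ne.symm hc])]
            rw [ih rest (c :: cur) acc (by simpa using Nat.le_of_succ_le_succ (by simpa using h))]
            simp [pvSplit, hc]

theorem pv_splitOn_eq (cs : List Char) :
    PySem.Chars.splitOn cs ['-'] = pvSplit cs [] := by
  have := pv_go_eq (cs.length + 1) cs [] [] (by omega)
  simpa [PySem.Chars.splitOn] using this

-- A's loop computes pvBuild
theorem pvA_fold (qs : List String) (cs : List Char) (k : Nat) (acc : List Char) :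
    (cs.foldl
      (fun (st : Nat × List Char) c =>
        if c = '-' then (st.1 + 1, st.2 ++ (PySem.List.pyGetD qs (st.1 : Int) "").toList)
        else (st.1, st.2 ++ [c]))
      (k, acc)).2 = acc ++ pvBuild qs cs k := by
  induction cs generalizing k acc with
  | nil => simp [pvBuild]
  | cons c rest ih =>
      by_cases h : c = '-'
      · subst h
        simp only [List.foldl_cons, pvBuild]
        rw [ih]
        simp
      · simp only [List.foldl_cons, if_neg h, pvBuild]
        rw [ih]
        simp

-- glue of the split is pvBuild
theorem pvGlue_split (qs : List String) (cs cur : List Char) (k : Nat) :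
    pvGlue qs (pvSplit cs cur) k = cur.reverse ++ pvBuild qs cs k := by
  induction cs generalizing cur k with
  | nil => simp [pvSplit, pvGlue, pvBuild]
  | cons c rest ih =>
      by_cases h : c = '-'
      · subst h
        simp only [pvSplit, pvBuild]
        obtain ⟨q, ps, hq⟩ : ∃ q ps, pvSplit rest [] = q :: ps := by
          cases hsp : pvSplit rest [] with
          | nil => exact absurd hsp (pvSplit_ne_nil rest [])
          | cons q ps => exact ⟨q, ps, rfl⟩
        rw [hq]
        show cur.reverse ++ (qs.getD k "").toList ++ pvGlue qs (q :: ps) (k + 1) = _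
        rw [← hq, ih]
        simp
      · simp only [pvSplit, if_neg h, pvBuild]
        rw [ih]
        simp

-- segment-wise reassembly (flatMap over range form) is pvGlue
theorem pvE (qs : List String) (parts : List (List Char)) (k : Nat) (h : parts ≠ []) :
    parts.headI ++ (List.range (parts.length - 1)).flatMap
      (fun j => (qs.getD (k + j) "").toList ++ parts.getD (j + 1) []) = pvGlue qs parts k := by
  induction parts generalizing k with
  | nil => exact absurd rfl h
  | cons p rest ih =>
      cases rest with
      | nil => simp [pvGlue]
      | cons q ps =>
          have hlen : (p :: q :: ps).length - 1 = ps.length + 1 := by simp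
          rw [hlen, List.range_succ_eq_map]
          simp only [List.flatMap_cons, List.flatMap_map]
          rw [pvGlue]
          have := ih (k := k + 1) (by simp)
          simp only [List.headI, List.length_cons, Nat.add_sub_cancel] at this
          rw [← this]
          simp only [List.headI]
          have harith : ∀ j : Nat, k + (j + 1) = (k + 1) + j := by omega
          simp only [Nat.add_zero, List.getD_cons_succ, List.getD_cons_zero]
          rw [List.flatMap_congr (fun j _ => by rw [harith j])]
          simp

theorem pvJoin_nil (ps : List (List Char)) : PySem.Chars.join [] ps = ps.flatten := by
  induction ps with
  | nil => rfl
  | cons p t ih =>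
      cases t with
      | nil => simp [PySem.Chars.join, List.intercalate]
      | cons q ts =>
          simp only [PySem.Chars.join, List.intercalate, List.intersperse] at ih ⊢
          simp_all

theorem pvFlatten_flatMap {α β : Type} (l : List α) (g : α → List (List β)) :
    (l.flatMap g).flatten = l.flatMap (fun x => (g x).flatten) := by
  induction l with
  | nil => simp
  | cons a t ih => simp [ih]

-- B's pieces, joined, are pvBuild
theorem pvB_eq (qs : List String) (cs : List Char) :
    PySem.Chars.join []
      ([PySem.List.pyGetD (pvSplit cs []) 0 []] ++
        List.flatMap
          (fun i => [(PySem.List.pyGetD qs (i - 1) "").toList, PySem.List.pyGetD (pvSplit cs []) i []])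
          (PySem.List.pyRange 1 ((pvSplit cs []).length : Int) 1))
    = pvBuild qs cs 0 := by
  have hne := pvSplit_ne_nil cs []
  set parts := pvSplit cs [] with hp
  rw [pvJoin_nil, PySem.List.pyRange_one]
  have h1 : (((parts.length : Int)) - 1).toNat = parts.length - 1 := by omega
  rw [h1, List.flatMap_map]
  have hcong : ∀ j ∈ List.range (parts.length - 1),
      [(PySem.List.pyGetD qs ((1 + (j : Int)) - 1) "").toList,
       PySem.List.pyGetD parts (1 + (j : Int)) []]
      = [(qs.getD j "").toList, parts.getD (j + 1) []] := by
    intro j _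
    have e1 : (1 + (j : Int)) - 1 = ((j : Nat) : Int) := by omega
    have e2 : (1 + (j : Int)) = (((j + 1 : Nat)) : Int) := by omega
    rw [e1, e2, PySem.List.pyGetD_natCast, PySem.List.pyGetD_natCast]
  rw [List.flatMap_congr hcong]
  rw [List.flatten_append, pvFlatten_flatMap]
  have hhead : PySem.List.pyGetD parts 0 [] = parts.headI := by
    rw [PySem.List.pyGetD_zero]
    cases hp2 : parts with
    | nil => exact absurd hp2 hne
    | cons p t => simp
  have := pvE qs parts 0 hne
  simp only [Nat.zero_add] at this
  simp only [List.flatten_cons, List.flatten_nil, List.append_nil, hhead,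
    List.flatten_cons, List.flatten_nil]
  rw [this, hp, pvGlue_split]
  simp

-- ===== VERDICT (by name: the statement is the Claim_ definition above) =====
theorem montar_palavra_com_paridades_spec : Claim_equal_montar_palavra_com_paridades := by
  intro palavra paridades _ _
  unfold Spec_montar_palavra_com_paridades
  unfold montar_palavra_com_paridades montar_palavra_com_paridades_alt
  simp only [PySem.List.len_eq, pv_splitOn_eq]
  rw [PySem.List.foldl_pyRange_zero_pyGetD' palavra.toList ' '
        (fun (st : Nat × List Char) c =>
          if c = '-' then (st.1 + 1, st.2 ++ (PySem.List.pyGetD paridades (st.1 : Int) "").toList)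
          else (st.1, st.2 ++ [c])) (0, ([] : List Char))]
  rw [pvA_fold]
  rw [PySem.List.foldl_append_eq_flatMap]
  rw [pvB_eq]
  simp
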